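-- pv_equiv track=rewrite | github.com/akabbas/resumatch | services/resume_health_analyzer.py | _generate_impact_feedback
-- ===== SOURCE A (Python) =====
-- from typing import Dict, List, Tuple, Optional
--
-- def _generate_impact_feedback(analysis_results: List[Dict]) -> List[str]:
--     """Generate overall feedback for impact analysis"""
--     feedback = []
--
--     # Count high-scoring bullets
--     high_scoring = [r for r in analysis_results if r['score'] >= 70]
--     medium_scoring = [r for r in analysis_results if 40 <= r['score'] < 70]
--     low_scoring = [r for r in analysis_results if r['score'] < 40]
--
--     feedback.append(f"Total bullet points analyzed: {len(analysis_results)}")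
--     feedback.append(f"High-impact bullets: {len(high_scoring)}")
--     feedback.append(f"Medium-impact bullets: {len(medium_scoring)}")
--     feedback.append(f"Low-impact bullets: {len(low_scoring)}")
--
--     if low_scoring:
--         feedback.append(f"Bullets needing improvement: {len(low_scoring)}")
--
--     return feedback
-- ===== SOURCE B (Python) =====
-- from typing import Dict, List, Tuple, Optional
--
-- def _generate_impact_feedback(analysis_results: List[Dict]) -> List[str]:
--     """Generate overall feedback for impact analysis (single counting pass)."""
--     high = medium = low = 0
--     for r in analysis_results:
--         s = r['score']
--         if s >= 70:
--             high += 1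
--         elif s >= 40:
--             medium += 1
--         else:
--             low += 1
--     feedback = [
--         f"Total bullet points analyzed: {len(analysis_results)}",
--         f"High-impact bullets: {high}",
--         f"Medium-impact bullets: {medium}",
--         f"Low-impact bullets: {low}",
--     ]
--     if low > 0:
--         feedback.append(f"Bullets needing improvement: {low}")
--     return feedback
-- ===== Notes on version B (the rewrite author's own statement) =====
-- stated objective: alternative
-- what changed: Replaces A's three filter comprehensions (three scans of the list) with one accumulating pass maintaining high/medium/low counters, building the feedback strings from the counters.
import Mathlib
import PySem

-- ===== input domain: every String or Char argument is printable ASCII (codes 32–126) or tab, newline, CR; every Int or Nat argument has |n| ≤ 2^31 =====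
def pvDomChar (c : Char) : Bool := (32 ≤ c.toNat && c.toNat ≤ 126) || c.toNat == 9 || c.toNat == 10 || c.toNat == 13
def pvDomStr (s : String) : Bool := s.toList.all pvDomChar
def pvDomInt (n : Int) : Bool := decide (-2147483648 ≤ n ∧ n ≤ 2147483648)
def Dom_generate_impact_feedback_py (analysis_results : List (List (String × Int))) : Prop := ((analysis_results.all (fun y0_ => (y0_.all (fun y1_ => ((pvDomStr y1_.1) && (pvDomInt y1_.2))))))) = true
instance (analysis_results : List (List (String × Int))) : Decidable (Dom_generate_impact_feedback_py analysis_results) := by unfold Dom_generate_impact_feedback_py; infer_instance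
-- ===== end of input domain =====

-- B replaces A's three filter scans by one accumulating pass with three counters; same return value.

-- r['score'] as first-match lookup in the association list (Pre_ guarantees the key exists)
def pvScore (r : List (String × Int)) : Int := ((PySem.Dict.mk r).get? "score").getD 0

-- ===== PORT A =====
def generate_impact_feedback_py (analysis_results : List (List (String × Int))) : List String :=
  let high_scoring := analysis_results.filter (fun r => 70 ≤ pvScore r)
  let medium_scoring := analysis_results.filter (fun r => 40 ≤ pvScore r ∧ pvScore r < 70)
  let low_scoring := analysis_results.filter (fun r => pvScore r < 40)
  let feedback := ["Total bullet points analyzed: " ++ PySem.Int.toStr (analysis_results.length : Int),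
                   "High-impact bullets: " ++ PySem.Int.toStr (high_scoring.length : Int),
                   "Medium-impact bullets: " ++ PySem.Int.toStr (medium_scoring.length : Int),
                   "Low-impact bullets: " ++ PySem.Int.toStr (low_scoring.length : Int)]
  if low_scoring ≠ [] then
    feedback ++ ["Bullets needing improvement: " ++ PySem.Int.toStr (low_scoring.length : Int)]
  else feedback

-- ===== PORT B =====
def pvStep (acc : Int × Int × Int) (r : List (String × Int)) : Int × Int × Int :=
  let s := pvScore r
  if 70 ≤ s then (acc.1 + 1, acc.2.1, acc.2.2)
  else if 40 ≤ s then (acc.1, acc.2.1 + 1, acc.2.2)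
  else (acc.1, acc.2.1, acc.2.2 + 1)

def generate_impact_feedback_py_alt (analysis_results : List (List (String × Int))) : List String :=
  let c := analysis_results.foldl pvStep (0, 0, 0)
  let feedback := ["Total bullet points analyzed: " ++ PySem.Int.toStr (analysis_results.length : Int),
                   "High-impact bullets: " ++ PySem.Int.toStr c.1,
                   "Medium-impact bullets: " ++ PySem.Int.toStr c.2.1,
                   "Low-impact bullets: " ++ PySem.Int.toStr c.2.2]
  if 0 < c.2.2 then feedback ++ ["Bullets needing improvement: " ++ PySem.Int.toStr c.2.2]
  else feedback

-- ===== PRECONDITION & SPEC =====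
-- Pre_: every record carries the key 'score' (Python raises KeyError otherwise)
def Pre_generate_impact_feedback_py (analysis_results : List (List (String × Int))) : Prop :=
  ∀ r ∈ analysis_results, (r.any (fun p => p.1 == "score")) = true
instance (analysis_results : List (List (String × Int))) : Decidable (Pre_generate_impact_feedback_py analysis_results) := by unfold Pre_generate_impact_feedback_py; infer_instance

def pvWitness_generate_impact_feedback_py : (List (List (String × Int))) := [[("score", 80)], [("score", 10)]]

def Spec_generate_impact_feedback_py (analysis_results : List (List (String × Int))) (out : List String) : Prop := out = generate_impact_feedback_py_alt analysis_results
instance (analysis_results : List (List (String × Int))) (out : List String) : Decidable (Spec_generate_impact_feedback_py analysis_results out) := by unfold Spec_generate_impact_feedback_py; infer_instance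

-- ===== CLAIM (what is proved, stated in full; the proofs are below) =====
def Claim_equal_generate_impact_feedback_py : Prop := ∀ (analysis_results : List (List (String × Int))), Dom_generate_impact_feedback_py analysis_results → Pre_generate_impact_feedback_py analysis_results → Spec_generate_impact_feedback_py analysis_results (generate_impact_feedback_py analysis_results)

-- ===== LEMMAS AND PROOFS =====

lemma foldl_pvStep (l : List (List (String × Int))) (h m lo : Int) :
    l.foldl pvStep (h, m, lo) =
      (h + ((l.filter (fun r => 70 ≤ pvScore r)).length : Int),
       m + ((l.filter (fun r => 40 ≤ pvScore r ∧ pvScore r < 70)).length : Int),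
       lo + ((l.filter (fun r => pvScore r < 40)).length : Int)) := by
  induction l generalizing h m lo with
  | nil => simp
  | cons x xs ih =>
    simp only [List.foldl_cons, List.filter_cons]
    rcases le_or_gt 70 (pvScore x) with hx | hx
    · rw [show pvStep (h, m, lo) x = (h + 1, m, lo) by simp [pvStep, hx], ih]
      have h1 : ¬ (40 ≤ pvScore x ∧ pvScore x < 70) := by omega
      have h2 : ¬ (pvScore x < 40) := by omega
      simp [hx, h1, h2]; omega
    · rcases le_or_gt 40 (pvScore x) with hx2 | hx2
      · rw [show pvStep (h, m, lo) x = (h, m + 1, lo) by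
          simp [pvStep, hx2, not_le.mpr hx], ih]
        have h1 : (40 ≤ pvScore x ∧ pvScore x < 70) := ⟨hx2, hx⟩
        simp [not_le.mpr hx, h1, not_lt.mpr hx2]; omega
      · rw [show pvStep (h, m, lo) x = (h, m, lo + 1) by
          simp [pvStep, not_le.mpr hx, not_le.mpr hx2], ih]
        have h1 : ¬ (40 ≤ pvScore x ∧ pvScore x < 70) := by omega
        simp [not_le.mpr hx, h1, hx2]; omega

-- ===== VERDICT (by name: the statement is the Claim_ definition above) =====
theorem generate_impact_feedback_py_spec : Claim_equal_generate_impact_feedback_py := by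
  intro ars _ _
  unfold Spec_generate_impact_feedback_py generate_impact_feedback_py generate_impact_feedback_py_alt
  rw [foldl_pvStep]
  simp only [zero_add]
  by_cases h : (ars.filter (fun r => pvScore r < 40)) = []
  · simp [h]
  · have hne : (ars.filter (fun r => pvScore r < 40)).length ≠ 0 := by
      simpa [List.length_eq_zero_iff] using h
    have hx : ∃ x ∈ ars, pvScore x < 40 := by
      obtain ⟨x, hx⟩ := List.exists_mem_of_ne_nil _ h
      exact ⟨x, (List.mem_filter.mp hx).1, by simpa using (List.mem_filter.mp hx).2⟩
    simp [h, hx]
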